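-- pv_equiv track=rewrite | github.com/zlguo3937/adc_capture | script/yml2hdl/yml2verilog.py | get_sel_addr_bus_rdata_assigns
-- ===== SOURCE A (Python) =====
-- def get_sel_addr_bus_rdata_assigns(yaml_data):
--     sel_addr_bus_rdata_assigns = []
--     for i, group in enumerate(yaml_data):
--         address = group['address']
--         sel_address_bus_rdata = "sel_" + group['address'] + "_bus_rdata"
--         if i < len(yaml_data) - 1:
--             next_address = yaml_data[i + 1]['address']
--             sel_addr_bus_rdata_assigns.append(
--                 f"    assign  {sel_address_bus_rdata:20} = (addr_{address}_sel & ~req_write) ? addr_{address}_sel_bus_rdata : sel_{next_address}_bus_rdata;\n")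
--         else:
--             sel_addr_bus_rdata_assigns.append(
--                 f"    assign  {sel_address_bus_rdata:20} = (addr_{address}_sel & ~req_write) ? addr_{address}_sel_bus_rdata : 16'h0;\n")
--     return sel_addr_bus_rdata_assigns
-- ===== SOURCE B (Python) =====
-- def get_sel_addr_bus_rdata_assigns(yaml_data):
--     # First pass: the ternary false-branch token paired with each group
--     # (the next group's sel_*_bus_rdata, and 16'h0 for the last group).
--     tails = ["sel_" + g['address'] + "_bus_rdata" for g in yaml_data[1:]] + ["16'h0"]
--     out = []
--     for group, tail in zip(yaml_data, tails):
--         address = group['address']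
--         lhs = "sel_" + address + "_bus_rdata"
--         out.append(
--             f"    assign  {lhs:20} = (addr_{address}_sel & ~req_write) ? addr_{address}_sel_bus_rdata : {tail};\n")
--     return out
-- ===== Notes on version B (the rewrite author's own statement) =====
-- stated objective: alternative
-- what changed: B precomputes the list of ternary false-branch tokens (next group's sel_*_bus_rdata, sentinel 16'h0 for the last) in a first pass, then emits every assign with one uniform format over zip(yaml_data, tails), removing the per-iteration index/length branch and the i+1 lookup.
import Mathlib
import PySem

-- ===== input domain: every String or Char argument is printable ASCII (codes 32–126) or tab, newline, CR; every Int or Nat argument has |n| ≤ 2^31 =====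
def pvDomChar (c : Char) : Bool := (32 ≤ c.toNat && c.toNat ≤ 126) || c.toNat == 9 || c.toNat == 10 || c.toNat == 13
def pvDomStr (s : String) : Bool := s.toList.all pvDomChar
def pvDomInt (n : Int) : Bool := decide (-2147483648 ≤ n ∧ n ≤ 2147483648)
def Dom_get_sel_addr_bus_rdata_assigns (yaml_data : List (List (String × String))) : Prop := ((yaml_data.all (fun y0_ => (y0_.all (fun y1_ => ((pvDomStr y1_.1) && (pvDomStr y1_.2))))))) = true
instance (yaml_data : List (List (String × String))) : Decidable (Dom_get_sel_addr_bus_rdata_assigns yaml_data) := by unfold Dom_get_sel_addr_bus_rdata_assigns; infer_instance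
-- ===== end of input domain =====

-- B builds the list of ternary false-branch tokens first, then formats every line uniformly
-- over zip(yaml_data, tails); A decides the false branch per iteration with an index/length test.
-- Equivalence on all inputs whose groups carry the 'address' key (elsewhere both raise KeyError).

-- shared helpers: dict lookup (first match, assoc-list convention) and Python's {s:20} left-pad
def pvAddr (g : List (String × String)) : String :=
  ((g.find? (fun p => p.1 == "address")).map (·.2)).getD ""

def pvPad20 (s : String) : String :=
  s ++ String.ofList (List.replicate (20 - PySem.Str.len s).toNat ' ')

-- ===== PORT A =====
def get_sel_addr_bus_rdata_assigns (yaml_data : List (List (String × String))) : List String :=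
  (PySem.List.enumerate yaml_data).foldl (fun acc ig =>
    let address := pvAddr ig.2
    let sel_address_bus_rdata := "sel_" ++ address ++ "_bus_rdata"
    if ig.1 < (yaml_data.length : Int) - 1 then
      let next_address := pvAddr (PySem.List.pyGetD yaml_data (ig.1 + 1) [])
      acc ++ ["    assign  " ++ pvPad20 sel_address_bus_rdata ++ " = (addr_" ++ address ++
              "_sel & ~req_write) ? addr_" ++ address ++ "_sel_bus_rdata : sel_" ++
              next_address ++ "_bus_rdata;\n"]
    else
      acc ++ ["    assign  " ++ pvPad20 sel_address_bus_rdata ++ " = (addr_" ++ address ++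
              "_sel & ~req_write) ? addr_" ++ address ++ "_sel_bus_rdata : 16'h0;\n"]) []

-- ===== PORT B =====
def pvFmt (address tail : String) : String :=
  "    assign  " ++ pvPad20 ("sel_" ++ address ++ "_bus_rdata") ++ " = (addr_" ++ address ++
  "_sel & ~req_write) ? addr_" ++ address ++ "_sel_bus_rdata : " ++ tail ++ ";\n"

def get_sel_addr_bus_rdata_assigns_alt (yaml_data : List (List (String × String))) : List String :=
  let tails := (PySem.List.slice yaml_data (some 1) none).map
      (fun g => "sel_" ++ pvAddr g ++ "_bus_rdata") ++ ["16'h0"]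
  (yaml_data.zip tails).foldl (fun acc gt => acc ++ [pvFmt (pvAddr gt.1) gt.2]) []

-- ===== PRECONDITION & SPEC =====
-- Pre_ excludes exactly the inputs where A raises KeyError: a group without the 'address' key.
def Pre_get_sel_addr_bus_rdata_assigns (yaml_data : List (List (String × String))) : Prop :=
  ∀ g ∈ yaml_data, (g.find? (fun p => p.1 == "address")).isSome
instance (yaml_data : List (List (String × String))) : Decidable (Pre_get_sel_addr_bus_rdata_assigns yaml_data) := by unfold Pre_get_sel_addr_bus_rdata_assigns; infer_instance

def pvWitness_get_sel_addr_bus_rdata_assigns : (List (List (String × String))) :=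
  [[("address", "ctrl")], [("address", "stat")]]

def Spec_get_sel_addr_bus_rdata_assigns (yaml_data : List (List (String × String))) (out : List String) : Prop := out = get_sel_addr_bus_rdata_assigns_alt yaml_data
instance (yaml_data : List (List (String × String))) (out : List String) : Decidable (Spec_get_sel_addr_bus_rdata_assigns yaml_data out) := by unfold Spec_get_sel_addr_bus_rdata_assigns; infer_instance

-- ===== CLAIM (what is proved, stated in full; the proofs are below) =====
def Claim_equal_get_sel_addr_bus_rdata_assigns : Prop := ∀ (yaml_data : List (List (String × String))), Dom_get_sel_addr_bus_rdata_assigns yaml_data → Pre_get_sel_addr_bus_rdata_assigns yaml_data → Spec_get_sel_addr_bus_rdata_assigns yaml_data (get_sel_addr_bus_rdata_assigns yaml_data)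

-- ===== LEMMAS AND PROOFS =====

-- the per-iteration line A emits, as one function (proof-only helper)
def pvLineA (yaml_data : List (List (String × String))) (ig : Int × List (String × String)) : String :=
  if ig.1 < (yaml_data.length : Int) - 1 then
    "    assign  " ++ pvPad20 ("sel_" ++ pvAddr ig.2 ++ "_bus_rdata") ++ " = (addr_" ++ pvAddr ig.2 ++
      "_sel & ~req_write) ? addr_" ++ pvAddr ig.2 ++ "_sel_bus_rdata : sel_" ++
      pvAddr (PySem.List.pyGetD yaml_data (ig.1 + 1) []) ++ "_bus_rdata;\n"
  else
    "    assign  " ++ pvPad20 ("sel_" ++ pvAddr ig.2 ++ "_bus_rdata") ++ " = (addr_" ++ pvAddr ig.2 ++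
      "_sel & ~req_write) ? addr_" ++ pvAddr ig.2 ++ "_sel_bus_rdata : 16'h0;\n"

theorem pvWitness_ok :
    Dom_get_sel_addr_bus_rdata_assigns pvWitness_get_sel_addr_bus_rdata_assigns ∧
    Pre_get_sel_addr_bus_rdata_assigns pvWitness_get_sel_addr_bus_rdata_assigns := by
  decide

-- the two f-strings of A, reassociated, are pvFmt with the corresponding tail
theorem pvFmt_next (address next : String) :
    "    assign  " ++ pvPad20 ("sel_" ++ address ++ "_bus_rdata") ++ " = (addr_" ++ address ++
      "_sel & ~req_write) ? addr_" ++ address ++ "_sel_bus_rdata : sel_" ++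
      next ++ "_bus_rdata;\n"
    = pvFmt address ("sel_" ++ next ++ "_bus_rdata") := by
  apply String.toList_inj.mp
  simp [pvFmt, String.toList_append]

theorem pvFmt_last (address : String) :
    "    assign  " ++ pvPad20 ("sel_" ++ address ++ "_bus_rdata") ++ " = (addr_" ++ address ++
      "_sel & ~req_write) ? addr_" ++ address ++ "_sel_bus_rdata : 16'h0;\n"
    = pvFmt address "16'h0" := by
  apply String.toList_inj.mp
  simp [pvFmt, String.toList_append]

-- ===== VERDICT (by name: the statement is the Claim_ definition above) =====
theorem get_sel_addr_bus_rdata_assigns_spec : Claim_equal_get_sel_addr_bus_rdata_assigns := by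
  intro yaml_data _ _
  unfold Spec_get_sel_addr_bus_rdata_assigns
  unfold get_sel_addr_bus_rdata_assigns get_sel_addr_bus_rdata_assigns_alt
  have hfun : (fun (acc : List String) (ig : Int × List (String × String)) =>
      let address := pvAddr ig.2
      let sel_address_bus_rdata := "sel_" ++ address ++ "_bus_rdata"
      if ig.1 < (yaml_data.length : Int) - 1 then
        let next_address := pvAddr (PySem.List.pyGetD yaml_data (ig.1 + 1) [])
        acc ++ ["    assign  " ++ pvPad20 sel_address_bus_rdata ++ " = (addr_" ++ address ++
                "_sel & ~req_write) ? addr_" ++ address ++ "_sel_bus_rdata : sel_" ++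
                next_address ++ "_bus_rdata;\n"]
      else
        acc ++ ["    assign  " ++ pvPad20 sel_address_bus_rdata ++ " = (addr_" ++ address ++
                "_sel & ~req_write) ? addr_" ++ address ++ "_sel_bus_rdata : 16'h0;\n"])
      = fun acc ig => acc ++ [pvLineA yaml_data ig] := by
    funext acc ig
    simp only [pvLineA]
    split <;> rfl
  rw [hfun, PySem.List.foldl_append_singleton_eq_map, PySem.List.foldl_append_singleton_eq_map,
      PySem.List.slice_from_one]
  simp only [List.nil_append]
  apply List.ext_getElem
  · simp [PySem.List.length_enumerate]
    omega
  · intro i h1 h2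
    simp only [List.length_map, PySem.List.length_enumerate] at h1
    simp only [List.getElem_map, PySem.List.getElem_enumerate, List.getElem_zip]
    by_cases hc : i + 1 < yaml_data.length
    · rw [pvLineA, if_pos (by push_cast; omega)]
      have hidx : (0 : Int) + (i : Int) + 1 = ((i + 1 : Nat) : Int) := by push_cast; ring
      rw [hidx, PySem.List.pyGetD_natCast, List.getD_eq_getElem _ _ hc,
          List.getElem_append_left (by simpa using (by omega : i < yaml_data.length - 1)),
          List.getElem_map, List.getElem_tail]
      exact pvFmt_next _ _
    · rw [pvLineA, if_neg (by push_cast; omega)]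
      rw [List.getElem_append_right (by simpa using (by omega : ¬ i < yaml_data.length - 1))]
      simp only [List.length_map, List.length_tail]
      rw [List.getElem_singleton]
      exact pvFmt_last _
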